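-- pv_equiv track=rewrite | github.com/bchimentao/beecrowd | beecrowd2567_virus.py | let_max
-- ===== SOURCE A (Python) =====
-- def let_max(lista_idades):
--
--     # ordenando a lista de idades
--     dias = lista_idades
--     dias.sort()
--
--     # se a quantidade de dias informados for ímpar, retira-se o termo do meio,
--     # pois ele será o pior positivo e o pior negativo para o cálculo
--     if len(dias) % 2 != 0:
--         termo_meio = (len(dias) // 2)
--         del(dias[termo_meio])
--
--     # divide a lista dias em dias positivos e dias negativos para que possamos
--     # fazer a diferença entre os maiores números com os menores
--     metade = int(len(dias) / 2)
--     if metade == 1: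
--         dias_positivos = [dias[1]]
--         dias_negativos = [dias[0]]
--     else:
--         dias_positivos = dias[metade::]
--         dias_negativos = dias[0:metade]
--
--     # lista com as diferenças
--     dif_dias = [dias_positivos[i] - dias_negativos[i] for i in range(len(dias_positivos))]
--
--     # retorna a soma da lista de diferenças
--     return sum(dif_dias)
-- ===== SOURCE B (Python) =====
-- def let_max(lista_idades):
--     # two-pointer peel over a sorted copy: add (largest - smallest) pairs from both ends
--     # (return-value equivalence only: A sorts/deletes in the caller's list, B does not mutate it)
--     s = sorted(lista_idades)
--     total = 0
--     i, j = 0, len(s) - 1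
--     while i < j:
--         total += s[j] - s[i]
--         i += 1
--         j -= 1
--     return total
-- ===== Notes on version B (the rewrite author's own statement) =====
-- stated objective: alternative
-- what changed: Replaces A's delete-the-middle / split-into-halves / elementwise-difference-list pipeline with a two-pointer peel over a sorted copy that accumulates (largest - smallest) pairs from both ends; B also does not mutate the caller's list.
import Mathlib
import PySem

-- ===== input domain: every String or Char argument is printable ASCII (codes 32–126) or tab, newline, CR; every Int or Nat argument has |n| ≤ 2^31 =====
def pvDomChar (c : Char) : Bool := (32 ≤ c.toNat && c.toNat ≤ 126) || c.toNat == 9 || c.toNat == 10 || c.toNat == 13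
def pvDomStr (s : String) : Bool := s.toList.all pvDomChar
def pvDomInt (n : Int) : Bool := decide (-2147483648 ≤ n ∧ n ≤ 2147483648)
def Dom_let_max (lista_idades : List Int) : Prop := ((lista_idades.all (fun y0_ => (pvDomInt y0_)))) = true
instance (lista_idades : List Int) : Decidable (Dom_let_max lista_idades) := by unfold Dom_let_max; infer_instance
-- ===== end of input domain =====

-- B replaces A's delete-the-middle / split-into-halves / difference-list pipeline with a two-pointer
-- peel over a sorted copy (alternative decomposition, same asymptotic cost). Equivalence is about the
-- RETURN value only: A sorts and deletes inside the caller's list, B does not mutate it.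

-- ===== PORT A =====
def let_max (lista_idades : List Int) : Int :=
  -- dias = lista_idades; dias.sort()
  let dias := PySem.List.sorted lista_idades (fun x => x) false
  -- if len(dias) % 2 != 0: del dias[len(dias)//2]
  -- (del at index len//2 is always in range here; exact per PySem.List.pop?_natCast)
  let dias := if dias.length % 2 ≠ 0 then dias.eraseIdx (dias.length / 2) else dias
  -- metade = int(len(dias)/2)  (exact: true division then int() truncation equals len/2 here)
  let metade := dias.length / 2
  let dias_positivos :=
    if metade = 1 then [PySem.List.pyGetD dias 1 0]   -- dias[1]; in range: metade = 1 forces len dias = 2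
    else PySem.List.slice dias (some (metade : Int)) none
  let dias_negativos :=
    if metade = 1 then [PySem.List.pyGetD dias 0 0]   -- dias[0]
    else PySem.List.slice dias (some 0) (some (metade : Int))
  -- dif_dias = [pos[i] - neg[i] for i in range(len(pos))]; indices always in range (equal lengths)
  let dif_dias := (PySem.List.pyRange 0 dias_positivos.length 1).map
    (fun i => PySem.List.pyGetD dias_positivos i 0 - PySem.List.pyGetD dias_negativos i 0)
  dif_dias.sum

-- ===== PORT B =====
-- while i < j: total += s[j] - s[i]; i += 1; j -= 1   (indices always in range while 0 ≤ i < j < len s)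
def letMaxPeel (s : List Int) (total i j : Int) : Int :=
  if h : i < j then
    letMaxPeel s (total + (PySem.List.pyGetD s j 0 - PySem.List.pyGetD s i 0)) (i + 1) (j - 1)
  else total
termination_by (j - i).toNat
decreasing_by omega

def let_max_alt (lista_idades : List Int) : Int :=
  let s := PySem.List.sorted lista_idades (fun x => x) false
  letMaxPeel s 0 0 ((s.length : Int) - 1)

-- ===== PRECONDITION & SPEC =====
def Spec_let_max (lista_idades : List Int) (out : Int) : Prop := out = let_max_alt lista_idades
instance (lista_idades : List Int) (out : Int) : Decidable (Spec_let_max lista_idades out) := by unfold Spec_let_max; infer_instance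

-- ===== CLAIM (what is proved, stated in full; the proofs are below) =====
def Claim_equal_let_max : Prop := ∀ (lista_idades : List Int), Dom_let_max lista_idades → Spec_let_max lista_idades (let_max lista_idades)

-- ===== LEMMAS AND PROOFS =====

theorem sum_map_sub_int (l : List Int) (f g : Int → Int) :
    (l.map (fun i => f i - g i)).sum = (l.map f).sum - (l.map g).sum := by
  induction l with
  | nil => simp
  | cons x t ih => simp [ih]; ring

-- sum of A's elementwise-difference comprehension = difference of sums
theorem sum_diff_comprehension (p q : List Int) (h : p.length = q.length) :
    ((PySem.List.pyRange 0 p.length 1).map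
      (fun i => PySem.List.pyGetD p i 0 - PySem.List.pyGetD q i 0)).sum = p.sum - q.sum := by
  rw [sum_map_sub_int, PySem.List.map_pyGetD_pyRange_zero', h, PySem.List.map_pyGetD_pyRange_zero']

-- the peel loop on window [i, j] adds (sum of its top ⌊w/2⌋ elements) - (sum of its bottom ⌊w/2⌋)
theorem letMaxPeel_eq (s : List Int) : ∀ (w : Nat) (total i j : Int), 0 ≤ i → j < s.length →
    (j + 1 - i).toNat = w →
    letMaxPeel s total i j =
      total + ((s.take (j + 1).toNat).drop ((j + 1).toNat - w / 2)).sum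
            - ((s.take (i.toNat + w / 2)).drop i.toNat).sum := by
  intro w
  induction w using Nat.strong_induction_on with
  | _ w ih =>
    intro total i j hi hj hw
    by_cases hlt : i < j
    · -- step: peel s[i] and s[j]; the window shrinks by two
      have hw2 : 2 ≤ w := by omega
      rw [letMaxPeel, dif_pos hlt]
      rw [ih (w - 2) (by omega) _ (i + 1) (j - 1) (by omega) (by omega) (by omega)]
      have hjn : j.toNat < s.length := by omega
      have hin : i.toNat < s.length := by omega
      have hgj : PySem.List.pyGetD s j 0 = s[j.toNat] :=
        PySem.List.pyGetD_eq_getElem s 0 (by omega) (by exact_mod_cast hj)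
      have hgi : PySem.List.pyGetD s i 0 = s[i.toNat] :=
        PySem.List.pyGetD_eq_getElem s 0 hi (by exact_mod_cast (by omega : i < (s.length : Int)))
      have e1 : (j - 1 + 1).toNat = j.toNat := by omega
      have e2 : (w - 2) / 2 = w / 2 - 1 := by omega
      have e3 : (i + 1).toNat = i.toNat + 1 := by omega
      have e4 : (i + 1).toNat + (w / 2 - 1) = i.toNat + w / 2 := by omega
      rw [e1, e2, e4, e3]
      have hback : (s.take (j + 1).toNat).drop ((j + 1).toNat - w / 2)
          = (s.take j.toNat).drop (j.toNat - (w / 2 - 1)) ++ [s[j.toNat]] := by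
        have ht : s.take (j + 1).toNat = s.take j.toNat ++ [s[j.toNat]] := by
          have e : (j + 1).toNat = j.toNat + 1 := by omega
          rw [e, List.take_add_one, List.getElem?_eq_getElem hjn]
          simp
        rw [ht, List.drop_append_of_le_length (by simp; omega)]
        have e : (j + 1).toNat - w / 2 = j.toNat - (w / 2 - 1) := by omega
        rw [e]
      have hfront : (s.take (i.toNat + w / 2)).drop i.toNat
          = s[i.toNat] :: (s.take (i.toNat + w / 2)).drop (i.toNat + 1) := by
        have hlen : i.toNat < (s.take (i.toNat + w / 2)).length := by simp; omega
        rw [List.drop_eq_getElem_cons hlen]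
        congr 1
        exact List.getElem_take
      rw [hback, hfront]
      simp [hgj, hgi]
      ring
    · -- base: i ≥ j, no full pair left; both segments are empty
      rw [letMaxPeel, dif_neg hlt]
      have hp : w / 2 = 0 := by omega
      rw [hp]
      simp

-- A's pipeline, expressed on the sorted list t: sum of the top half minus sum of the bottom half
theorem letA_halves (t : List Int) :
    (let dias := if t.length % 2 ≠ 0 then t.eraseIdx (t.length / 2) else t
     let metade := dias.length / 2
     let dias_positivos :=
       if metade = 1 then [PySem.List.pyGetD dias 1 0]
       else PySem.List.slice dias (some (metade : Int)) none
     let dias_negativos :=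
       if metade = 1 then [PySem.List.pyGetD dias 0 0]
       else PySem.List.slice dias (some 0) (some (metade : Int))
     ((PySem.List.pyRange 0 dias_positivos.length 1).map
       (fun i => PySem.List.pyGetD dias_positivos i 0 - PySem.List.pyGetD dias_negativos i 0)).sum)
    = (t.drop (t.length - t.length / 2)).sum - (t.take (t.length / 2)).sum := by
  simp only []
  by_cases hodd : t.length % 2 ≠ 0
  · -- odd length: the middle element is deleted first
    rw [if_pos hodd]
    have hlt : t.length / 2 < t.length := by omega
    have hd : t.eraseIdx (t.length / 2) = t.take (t.length / 2) ++ t.drop (t.length / 2 + 1) :=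
      List.eraseIdx_eq_take_drop_succ t (t.length / 2)
    have hlen : (t.eraseIdx (t.length / 2)).length = t.length - 1 := by
      rw [List.length_eraseIdx_of_lt hlt]
    have hm : (t.eraseIdx (t.length / 2)).length / 2 = t.length / 2 := by omega
    rw [hm]
    by_cases h1 : t.length / 2 = 1
    · -- len(t) = 3: A's special metade == 1 branch
      rw [if_pos h1, if_pos h1]
      obtain ⟨a, b, c, rfl⟩ := List.length_eq_three.mp (show t.length = 3 by omega)
      simp at hd ⊢
      rw [PySem.List.pyRange_one]; norm_num; rfl
    · rw [if_neg h1, if_neg h1]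
      rw [PySem.List.slice_from_natCast, PySem.List.slice_zero_start, PySem.List.slice_to_natCast]
      rw [sum_diff_comprehension _ _ (by simp; omega)]
      have hpos : (t.eraseIdx (t.length / 2)).drop (t.length / 2)
          = t.drop (t.length - t.length / 2) := by
        rw [hd, List.drop_append_of_le_length (by simp; omega)]
        have e : t.length - t.length / 2 = t.length / 2 + 1 := by omega
        simp [e]
      have hneg : (t.eraseIdx (t.length / 2)).take (t.length / 2)
          = t.take (t.length / 2) := by
        rw [hd, List.take_append_of_le_length (by simp; omega)]
        simp [List.take_take]
      rw [hpos, hneg]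
  · -- even length: no deletion
    rw [if_neg hodd]
    by_cases h1 : t.length / 2 = 1
    · -- len(t) = 2: A's special metade == 1 branch
      rw [if_pos h1, if_pos h1]
      obtain ⟨a, b, rfl⟩ := List.length_eq_two.mp (show t.length = 2 by omega)
      simp
      rw [PySem.List.pyRange_one]; norm_num; rfl
    · rw [if_neg h1, if_neg h1]
      rw [PySem.List.slice_from_natCast, PySem.List.slice_zero_start, PySem.List.slice_to_natCast]
      rw [sum_diff_comprehension _ _ (by simp; omega)]
      have e : t.length - t.length / 2 = t.length / 2 := by omega
      rw [e]

theorem let_max_spec' (l : List Int) : let_max l = let_max_alt l := by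
  unfold let_max let_max_alt
  have hpeel := letMaxPeel_eq (PySem.List.sorted l (fun x => x) false)
    (PySem.List.sorted l (fun x => x) false).length 0 0
    (((PySem.List.sorted l (fun x => x) false).length : Int) - 1) le_rfl (by omega) (by omega)
  rw [hpeel, letA_halves]
  set t := PySem.List.sorted l (fun x => x) false
  have e1 : ((t.length : Int) - 1 + 1).toNat = t.length := by omega
  rw [e1]
  simp

-- ===== VERDICT (by name: the statement is the Claim_ definition above) =====
theorem let_max_spec : Claim_equal_let_max := by
  intro l _
  exact let_max_spec' l
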